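-- pv_equiv track=rewrite | github.com/iacopy/monnalisa | src/drawer.py | get_symmetry
-- ===== SOURCE A (Python) =====
-- def get_symmetry(image_size, symmetry_element, points):
--     """
--     Return symmetric points against given symmetry element.
--     """
--     width, height = image_size
--     if symmetry_element == 'x':
--         rv = [(width - x, y) for (x, y) in points]
--     elif symmetry_element == 'y':
--         rv = [(x, height - y) for (x, y) in points]
--     elif symmetry_element == 'o':
--         rv = [(width - x, height - y) for (x, y) in points]
--     elif symmetry_element == '.':
--         return points
--     else:
--         raise Exception('Invalid symmetry_element value: "{}"'.format(symmetry_element))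
--     return rv
-- ===== SOURCE B (Python) =====
-- def _flip_x(width, ps):
--     return [(width - x, y) for (x, y) in ps]
--
-- def _flip_y(height, ps):
--     return [(x, height - y) for (x, y) in ps]
--
-- _STAGES = {'x': 'X', 'y': 'Y', 'o': 'XY', '.': ''}
--
-- def get_symmetry(image_size, symmetry_element, points):
--     """
--     Return symmetric points against given symmetry element.
--
--     Decomposes the symmetry into a sequence of primitive axis reflections
--     ('o' = reflect across x then across y) and applies the stages in turn.
--     """
--     if symmetry_element not in _STAGES:
--         raise Exception('Invalid symmetry_element value: "{}"'.format(symmetry_element))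
--     width, height = image_size
--     for stage in _STAGES[symmetry_element]:
--         if stage == 'X':
--             points = _flip_x(width, points)
--         else:
--             points = _flip_y(height, points)
--     return points
-- ===== Notes on version B (the rewrite author's own statement) =====
-- stated objective: alternative
-- what changed: B decomposes each symmetry into a sequence of primitive axis reflections ('o' = flip_x then flip_y, two staged passes) applied by a loop over a stage list, instead of A's four separate branch comprehensions.
import Mathlib
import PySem

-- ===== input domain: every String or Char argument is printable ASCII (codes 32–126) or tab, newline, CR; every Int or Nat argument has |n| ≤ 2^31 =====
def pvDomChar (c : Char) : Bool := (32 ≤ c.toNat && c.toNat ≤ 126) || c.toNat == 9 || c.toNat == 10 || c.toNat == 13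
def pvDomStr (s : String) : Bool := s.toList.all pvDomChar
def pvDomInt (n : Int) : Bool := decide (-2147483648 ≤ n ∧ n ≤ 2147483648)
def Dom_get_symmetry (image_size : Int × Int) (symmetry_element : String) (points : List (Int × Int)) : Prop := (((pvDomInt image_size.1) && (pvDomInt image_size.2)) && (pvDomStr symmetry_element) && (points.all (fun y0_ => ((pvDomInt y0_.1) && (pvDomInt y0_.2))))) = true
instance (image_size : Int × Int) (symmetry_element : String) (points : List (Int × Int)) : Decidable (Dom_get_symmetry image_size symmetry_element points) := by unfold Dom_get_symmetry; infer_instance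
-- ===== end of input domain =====

-- B decomposes each symmetry into a sequence of primitive axis reflections
-- ('o' = flip_x then flip_y, two staged passes) applied by a loop over a stage
-- list, instead of A's four branch-specific comprehensions (objective: alternative).

-- ===== PORT A =====
-- Literal transliteration: four string-equality branches, each with its own comprehension.
def get_symmetry (image_size : Int × Int) (symmetry_element : String) (points : List (Int × Int)) : List (Int × Int) :=
  let width := image_size.1
  let height := image_size.2
  if symmetry_element == "x" then
    points.map (fun p => (width - p.1, p.2))
  else if symmetry_element == "y" then
    points.map (fun p => (p.1, height - p.2))
  else if symmetry_element == "o" then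
    points.map (fun p => (width - p.1, height - p.2))
  else if symmetry_element == "." then
    points
  else
    []  -- Python raises Exception here; excluded by Pre_get_symmetry

-- ===== PORT B =====
def pvFlipX (width : Int) (ps : List (Int × Int)) : List (Int × Int) :=
  ps.map (fun p => (width - p.1, p.2))

def pvFlipY (height : Int) (ps : List (Int × Int)) : List (Int × Int) :=
  ps.map (fun p => (p.1, height - p.2))

def pvStages : PySem.Dict String String :=
  PySem.Dict.ofList [("x", "X"), ("y", "Y"), ("o", "XY"), (".", "")]

def get_symmetry_alt (image_size : Int × Int) (symmetry_element : String) (points : List (Int × Int)) : List (Int × Int) :=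
  match PySem.Dict.get? pvStages symmetry_element with
  | none => []  -- Python raises Exception here; excluded by Pre_get_symmetry
  | some stages =>
    stages.toList.foldl
      (fun ps stage =>
        if stage == 'X' then pvFlipX image_size.1 ps else pvFlipY image_size.2 ps)
      points

-- ===== PRECONDITION & SPEC =====
-- Pre_ excludes exactly the symmetry_element values on which both Pythons raise Exception.
def Pre_get_symmetry (image_size : Int × Int) (symmetry_element : String) (points : List (Int × Int)) : Prop :=
  symmetry_element = "x" ∨ symmetry_element = "y" ∨ symmetry_element = "o" ∨ symmetry_element = "."
instance (image_size : Int × Int) (symmetry_element : String) (points : List (Int × Int)) : Decidable (Pre_get_symmetry image_size symmetry_element points) := by unfold Pre_get_symmetry; infer_instance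

def pvWitness_get_symmetry : (Int × Int) × String × (List (Int × Int)) := ((10, 8), "o", [(1, 2), (3, 4)])

def Spec_get_symmetry (image_size : Int × Int) (symmetry_element : String) (points : List (Int × Int)) (out : List (Int × Int)) : Prop := out = get_symmetry_alt image_size symmetry_element points
instance (image_size : Int × Int) (symmetry_element : String) (points : List (Int × Int)) (out : List (Int × Int)) : Decidable (Spec_get_symmetry image_size symmetry_element points out) := by unfold Spec_get_symmetry; infer_instance

-- ===== CLAIM (what is proved, stated in full; the proofs are below) =====
def Claim_equal_get_symmetry : Prop := ∀ (image_size : Int × Int) (symmetry_element : String) (points : List (Int × Int)), Dom_get_symmetry image_size symmetry_element points → Pre_get_symmetry image_size symmetry_element points → Spec_get_symmetry image_size symmetry_element points (get_symmetry image_size symmetry_element points)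

-- ===== LEMMAS AND PROOFS =====
theorem pvStages_x : PySem.Dict.get? pvStages "x" = some "X" := by decide
theorem pvStages_y : PySem.Dict.get? pvStages "y" = some "Y" := by decide
theorem pvStages_o : PySem.Dict.get? pvStages "o" = some "XY" := by decide
theorem pvStages_dot : PySem.Dict.get? pvStages "." = some "" := by decide

-- ===== VERDICT (by name: the statement is the Claim_ definition above) =====
theorem get_symmetry_spec : Claim_equal_get_symmetry := by
  intro sz se pts _ hpre
  rcases hpre with h | h | h | h <;> subst h <;>
    simp [Spec_get_symmetry, get_symmetry, get_symmetry_alt,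
      pvStages_x, pvStages_y, pvStages_o, pvStages_dot,
      pvFlipX, pvFlipY, List.foldl, List.map_map, Function.comp]
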